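-- pv_equiv track=rewrite | github.com/ryanwmichaud/Steel | steelV2.py | findChords
-- ===== SOURCE A (Python) =====
-- from typing import List, Set
--
-- def findChords(notes: Set[int], qualities):
--     if not isinstance(notes, set):
--         raise TypeError("expected notes to be a set")
--
--     results= {
--         'major' : [],
--         'minor' : [],
--         'dim' : [],
--         'maj6' : [],
--         'min6' : [],
--         'min7' : [],
--         'hdim' : [],
--         'fdim' : [],
--         '7' : []
--     }
--
--     for root in notes:
--         if (root+7)%12 in notes:
--             if (root+4)%12 in notes:
--                 results['major'].append(root)
--                 if (root+9)%12 in notes: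
--                     results['maj6'].append(root)
--                     results['min7'].append((root+9)%12)
--                 if (root+10)%12 in notes:
--                     results['7'].append(root)
--             if (root+3)%12 in notes:
--                 results['minor'].append(root)
--                 if (root+9)%12 in notes:
--                     results['min6'].append((root))
--                     results['hdim'].append((root+9)%12)
--         if (root+6)%12 in notes and (root+3)%12 in notes:
--             results['dim'].append(root)
--             if (root+9)%12 in notes:
--                 results['fdim'].append(root)
--
--     output = []
--     for quality in qualities:
--         output.append((quality, results[quality]))
--     return output
-- ===== SOURCE B (Python) =====
-- # Simpler re-implementation: quality-major scan. Each chord quality is a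
-- # (interval offsets, append-the-9th?) spec; each requested quality's list is
-- # built directly by one comprehension over the notes, instead of A's
-- # root-major nested if/else tree mutating a results dict.
--
-- def _spec(quality):
--     if quality == 'major':
--         return (4, 7), False
--     elif quality == 'minor':
--         return (3, 7), False
--     elif quality == 'dim':
--         return (3, 6), False
--     elif quality == 'maj6':
--         return (4, 7, 9), False
--     elif quality == 'min6':
--         return (3, 7, 9), False
--     elif quality == 'min7':
--         return (4, 7, 9), True
--     elif quality == 'hdim':
--         return (3, 7, 9), True
--     elif quality == 'fdim':
--         return (3, 6, 9), False
--     elif quality == '7':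
--         return (4, 7, 10), False
--     raise KeyError(quality)
--
--
-- def findChords(notes, qualities):
--     if not isinstance(notes, set):
--         raise TypeError("expected notes to be a set")
--     output = []
--     for quality in qualities:
--         offsets, shift9 = _spec(quality)
--         output.append((quality,
--                        [(r + 9) % 12 if shift9 else r
--                         for r in notes
--                         if all((r + o) % 12 in notes for o in offsets)]))
--     return output
-- ===== Notes on version B (the rewrite author's own statement) =====
-- stated objective: simpler
-- what changed: Replaces A's root-major nested if/else condition tree and mutable per-quality results dict by a per-quality (interval offsets, shift) spec and a quality-major comprehension that builds each requested quality's list directly.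
import Mathlib
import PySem

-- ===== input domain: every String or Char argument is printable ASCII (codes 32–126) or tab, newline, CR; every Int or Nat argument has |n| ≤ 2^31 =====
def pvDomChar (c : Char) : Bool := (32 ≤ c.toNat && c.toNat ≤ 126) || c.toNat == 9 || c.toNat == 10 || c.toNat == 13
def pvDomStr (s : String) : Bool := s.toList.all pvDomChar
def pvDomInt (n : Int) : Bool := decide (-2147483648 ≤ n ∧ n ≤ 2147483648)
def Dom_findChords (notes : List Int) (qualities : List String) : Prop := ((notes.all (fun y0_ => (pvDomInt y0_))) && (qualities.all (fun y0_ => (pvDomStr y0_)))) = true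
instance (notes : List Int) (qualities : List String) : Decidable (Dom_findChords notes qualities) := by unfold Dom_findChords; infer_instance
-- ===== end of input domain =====

-- B replaces A's root-major nested if/else tree and mutable results dict by a per-quality
-- (interval offsets, shift) spec and a quality-major comprehension (objective: simpler).


-- ===== SHARED: CPython set-of-int iteration order =====
-- Python A and Python B both iterate `for … in notes` over a SET; the List Int argument is
-- the set's distinct elements in the order the set was built from (repr-sorted, the codec's
-- convention), and both Pythons see the same set, so both ports share this model of CPython's
-- set table (setobject.c: open addressing, LINEAR_PROBES=9, PERTURB_SHIFT=5, growth to the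
-- smallest power of two > 4*used once fill*5 >= mask*3). Exact on the |n| ≤ 2^31 domain
-- (hash(n) = n there, except hash(-1) = -2); the fuel always outlasts the probe loop.
def pvHash (n : Int) : Nat :=
  (((if n = -1 then -2 else n) : Int) % ((2 : Int) ^ 64)).toNat

-- probe slot j then up to k following slots: some (some j) = free slot j, some none = present
def pvScan (t : List (Option Int)) (n : Int) : Nat → Nat → Option (Option Nat)
  | j, 0 =>
    (match t.getD j none with
     | none => some (some j)
     | some e => if e = n then some none else none)
  | j, k + 1 =>
    (match t.getD j none with
     | none => some (some j)
     | some e => if e = n then some none else pvScan t n (j + 1) k)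

def pvInsLoop (n : Int) : Nat → List (Option Int) → Nat → Nat → List (Option Int) × Bool
  | 0, t, _, _ => (t, false)
  | f + 1, t, i, perturb =>
    let mask := t.length - 1
    match pvScan t n i (if i + 9 ≤ mask then 9 else 0) with
    | some (some j) => (t.set j (some n), true)
    | some none => (t, false)
    | none => pvInsLoop n f t ((i * 5 + 1 + (perturb >>> 5)) &&& mask) (perturb >>> 5)

def pvIns (t : List (Option Int)) (n : Int) : List (Option Int) × Bool :=
  pvInsLoop n (t.length * 4 + 64) t (pvHash n &&& (t.length - 1)) (pvHash n)

-- newsize = 8; while newsize <= minused: newsize <<= 1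
def pvNewSize : Nat → Nat → Nat → Nat
  | 0, s, _ => s
  | f + 1, s, m => if s ≤ m then pvNewSize f (s * 2) m else s

def pvAdd (st : List (Option Int) × Nat) (n : Int) : List (Option Int) × Nat :=
  match pvIns st.1 n with
  | (t, false) => (t, st.2)
  | (t, true) =>
    let used := st.2 + 1
    if used * 5 ≥ (t.length - 1) * 3 then
      let ns := pvNewSize 64 8 (if used > 50000 then used * 2 else used * 4)
      (t.foldl (fun nt e => match e with | some v => (pvIns nt v).1 | none => nt)
        (List.replicate ns none), used)
    else (t, used)

def pvSetOrder (notes : List Int) : List Int :=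
  (notes.foldl pvAdd (List.replicate 8 none, 0)).1.filterMap id

-- ===== PORT A =====
-- `results[quality]` in the output loop raises KeyError when quality is not one of the nine
-- keys; the port totalises with getD [] there and Pre_findChords excludes exactly those inputs.
def findChords (notes : List Int) (qualities : List String) : List (String × List Int) :=
  let results : PySem.Dict String (List Int) :=
    PySem.Dict.ofList
      [("major", []), ("minor", []), ("dim", []), ("maj6", []), ("min6", []),
       ("min7", []), ("hdim", []), ("fdim", []), ("7", [])]
  let results := (pvSetOrder notes).foldl
    (fun results root =>
      let results :=
        if notes.contains (PySem.Int.mod (root + 7) 12) then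
          let results :=
            if notes.contains (PySem.Int.mod (root + 4) 12) then
              let results := results.modify "major" [] (· ++ [root])
              let results :=
                if notes.contains (PySem.Int.mod (root + 9) 12) then
                  (results.modify "maj6" [] (· ++ [root])).modify "min7" []
                    (· ++ [PySem.Int.mod (root + 9) 12])
                else results
              if notes.contains (PySem.Int.mod (root + 10) 12) then
                results.modify "7" [] (· ++ [root])
              else results
            else results
          if notes.contains (PySem.Int.mod (root + 3) 12) then
            let results := results.modify "minor" [] (· ++ [root])
            if notes.contains (PySem.Int.mod (root + 9) 12) then
              (results.modify "min6" [] (· ++ [root])).modify "hdim" []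
                (· ++ [PySem.Int.mod (root + 9) 12])
            else results
          else results
        else results
      if notes.contains (PySem.Int.mod (root + 6) 12) &&
         notes.contains (PySem.Int.mod (root + 3) 12) then
        let results := results.modify "dim" [] (· ++ [root])
        if notes.contains (PySem.Int.mod (root + 9) 12) then
          results.modify "fdim" [] (· ++ [root])
        else results
      else results)
    results
  qualities.foldl (fun output quality => output ++ [(quality, results.getD quality [])]) []

-- ===== PORT B =====
-- Source B's _spec helper: quality -> (interval offsets, append the 9th instead of the root)
def pvSpec (q : String) : Option (List Int × Bool) :=
  if q = "major" then some ([4, 7], false)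
  else if q = "minor" then some ([3, 7], false)
  else if q = "dim" then some ([3, 6], false)
  else if q = "maj6" then some ([4, 7, 9], false)
  else if q = "min6" then some ([3, 7, 9], false)
  else if q = "min7" then some ([4, 7, 9], true)
  else if q = "hdim" then some ([3, 7, 9], true)
  else if q = "fdim" then some ([3, 6, 9], false)
  else if q = "7" then some ([4, 7, 10], false)
  else none

-- Source B raises KeyError on a quality outside the spec; the port skips such a quality
-- (Pre_findChords excludes those inputs).
def findChords_alt (notes : List Int) (qualities : List String) : List (String × List Int) :=
  qualities.foldl
    (fun output quality =>
      match pvSpec quality with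
      | none => output
      | some (offsets, shift9) =>
        output ++
          [(quality,
            (pvSetOrder notes).filterMap (fun r =>
              if offsets.all (fun o => notes.contains (PySem.Int.mod (r + o) 12)) then
                some (if shift9 then PySem.Int.mod (r + 9) 12 else r)
              else none))])
    []

-- ===== PRECONDITION & SPEC =====
-- Pre_ excludes exactly the inputs on which Python A raises KeyError: a quality outside the
-- nine keys of the results dict. A returns normally on every other input.
def Pre_findChords (notes : List Int) (qualities : List String) : Prop :=
  ∀ q ∈ qualities,
    q ∈ ["major", "minor", "dim", "maj6", "min6", "min7", "hdim", "fdim", "7"]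
instance (notes : List Int) (qualities : List String) : Decidable (Pre_findChords notes qualities) := by
  unfold Pre_findChords; infer_instance

def pvWitness_findChords : List Int × List String :=
  ([0, 4, 7, 9], ["major", "maj6", "min7", "7", "minor"])

def Spec_findChords (notes : List Int) (qualities : List String) (out : List (String × List Int)) : Prop :=
  out = findChords_alt notes qualities
instance (notes : List Int) (qualities : List String) (out : List (String × List Int)) : Decidable (Spec_findChords notes qualities out) := by
  unfold Spec_findChords; infer_instance

-- ===== CLAIM (what is proved, stated in full; the proofs are below) =====
def Claim_equal_findChords : Prop :=
  ∀ (notes : List Int) (qualities : List String), Dom_findChords notes qualities →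
    Pre_findChords notes qualities → Spec_findChords notes qualities (findChords notes qualities)

-- ===== LEMMAS AND PROOFS =====

-- B's per-root selector for one spec row (named copy of the lambda inside findChords_alt)
def pvSel (notes : List Int) (offs : List Int) (s9 : Bool) (root : Int) : Option Int :=
  if offs.all (fun o => notes.contains (PySem.Int.mod (root + o) 12)) then
    some (if s9 then PySem.Int.mod (root + 9) 12 else root)
  else none

-- named copies of A's initial dict and loop body (definitionally the ones inside findChords)
def pvInit : PySem.Dict String (List Int) :=
  PySem.Dict.ofList
    [("major", []), ("minor", []), ("dim", []), ("maj6", []), ("min6", []),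
     ("min7", []), ("hdim", []), ("fdim", []), ("7", [])]

def pvStepA (notes : List Int) (results : PySem.Dict String (List Int)) (root : Int) :
    PySem.Dict String (List Int) :=
  let results :=
    if notes.contains (PySem.Int.mod (root + 7) 12) then
      let results :=
        if notes.contains (PySem.Int.mod (root + 4) 12) then
          let results := results.modify "major" [] (· ++ [root])
          let results :=
            if notes.contains (PySem.Int.mod (root + 9) 12) then
              (results.modify "maj6" [] (· ++ [root])).modify "min7" []
                (· ++ [PySem.Int.mod (root + 9) 12])
            else results
          if notes.contains (PySem.Int.mod (root + 10) 12) then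
            results.modify "7" [] (· ++ [root])
          else results
        else results
      if notes.contains (PySem.Int.mod (root + 3) 12) then
        let results := results.modify "minor" [] (· ++ [root])
        if notes.contains (PySem.Int.mod (root + 9) 12) then
          (results.modify "min6" [] (· ++ [root])).modify "hdim" []
            (· ++ [PySem.Int.mod (root + 9) 12])
        else results
      else results
    else results
  if notes.contains (PySem.Int.mod (root + 6) 12) &&
     notes.contains (PySem.Int.mod (root + 3) 12) then
    let results := results.modify "dim" [] (· ++ [root])
    if notes.contains (PySem.Int.mod (root + 9) 12) then
      results.modify "fdim" [] (· ++ [root])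
    else results
  else results

lemma findChords_eq (notes : List Int) (qualities : List String) :
    findChords notes qualities =
      qualities.foldl
        (fun output quality =>
          output ++ [(quality, ((pvSetOrder notes).foldl (pvStepA notes) pvInit).getD quality [])])
        [] := rfl

lemma init_getD (q : String) : pvInit.getD q [] = [] := by
  simp only [pvInit, PySem.Dict.ofList, PySem.Dict.update, List.foldl,
    PySem.Dict.getD_insert, PySem.Dict.getD_empty]
  split_ifs <;> rfl

set_option maxHeartbeats 1600000 in
lemma stepA_getD (notes : List Int) (root : Int) (q : String) (offs : List Int) (s9 : Bool)
    (hq : pvSpec q = some (offs, s9)) (d : PySem.Dict String (List Int)) :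
    (pvStepA notes d root).getD q [] = d.getD q [] ++ (pvSel notes offs s9 root).toList := by
  unfold pvSpec at hq
  split_ifs at hq <;>
    (injection hq with hq; cases hq;
     simp [pvStepA, pvSel]; split_ifs <;> simp_all [PySem.Dict.getD_modify])

lemma foldA_getD (notes : List Int) (q : String) (offs : List Int) (s9 : Bool)
    (hq : pvSpec q = some (offs, s9)) :
    ∀ (roots : List Int) (d : PySem.Dict String (List Int)),
      ((roots.foldl (pvStepA notes) d).getD q []) =
        d.getD q [] ++ roots.filterMap (pvSel notes offs s9)
  | [], d => by simp
  | r :: rs, d => by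
    rw [List.foldl_cons, foldA_getD notes q offs s9 hq rs, stepA_getD notes r q offs s9 hq d,
      List.filterMap_cons]
    cases pvSel notes offs s9 r <;> simp

lemma item_eq (notes : List Int) (q : String) (offs : List Int) (s9 : Bool)
    (acc : List (String × List Int)) (hq : pvSpec q = some (offs, s9)) :
    acc ++ [(q, ((pvSetOrder notes).foldl (pvStepA notes) pvInit).getD q [])] =
      (match pvSpec q with
       | none => acc
       | some (offsets, shift9) =>
         acc ++
           [(q,
             (pvSetOrder notes).filterMap (fun r =>
               if offsets.all (fun o => notes.contains (PySem.Int.mod (r + o) 12)) then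
                 some (if shift9 then PySem.Int.mod (r + 9) 12 else r)
               else none))]) := by
  rw [hq, foldA_getD notes q offs s9 hq (pvSetOrder notes) pvInit, init_getD, List.nil_append]
  rfl

-- ===== VERDICT (by name: the statement is the Claim_ definition above) =====
theorem findChords_spec : Claim_equal_findChords := by
  intro notes qualities _ hpre
  unfold Spec_findChords
  rw [findChords_eq]
  unfold findChords_alt
  apply PySem.List.foldl_congr_mem
  intro acc q hqmem
  have hmem := hpre q hqmem
  simp only [List.mem_cons, List.not_mem_nil, or_false] at hmem
  rcases hmem with rfl | rfl | rfl | rfl | rfl | rfl | rfl | rfl | rfl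
  · exact item_eq notes "major" [4, 7] false acc rfl
  · exact item_eq notes "minor" [3, 7] false acc rfl
  · exact item_eq notes "dim" [3, 6] false acc rfl
  · exact item_eq notes "maj6" [4, 7, 9] false acc rfl
  · exact item_eq notes "min6" [3, 7, 9] false acc rfl
  · exact item_eq notes "min7" [4, 7, 9] true acc rfl
  · exact item_eq notes "hdim" [3, 7, 9] true acc rfl
  · exact item_eq notes "fdim" [3, 6, 9] false acc rfl
  · exact item_eq notes "7" [4, 7, 10] false acc rfl
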